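-- pv_equiv track=rewrite | github.com/monahand1023/corpus | src/corpus/chunkers/markdown.py | _find_code_fences
-- ===== SOURCE A (Python) =====
-- def _find_code_fences(text: str) -> list[tuple[int, int]]:
--     spans: list[tuple[int, int]] = []
--     i = 0
--     while i < len(text):
--         start = text.find("```", i)
--         if start == -1:
--             break
--         end = text.find("```", start + 3)
--         if end == -1:
--             spans.append((start, len(text)))
--             break
--         end += 3
--         spans.append((start, end))
--         i = end
--     return spans
-- ===== SOURCE B (Python) =====
-- def _find_code_fences(text: str) -> list[tuple[int, int]]:
--     # Pass 1: collect every (non-overlapping) fence start position.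
--     positions: list[int] = []
--     p = text.find("```")
--     while p != -1:
--         positions.append(p)
--         p = text.find("```", p + 3)
--     # Pass 2: pair the positions two at a time.
--     spans: list[tuple[int, int]] = []
--     k = 0
--     while k + 1 < len(positions):
--         spans.append((positions[k], positions[k + 1] + 3))
--         k += 2
--     if k < len(positions):  # unclosed final fence
--         spans.append((positions[k], len(text)))
--     return spans
-- ===== Notes on version B (the rewrite author's own statement) =====
-- stated objective: alternative
-- what changed: B separates the work into two passes: first collect all non-overlapping fence start positions, then pair them two at a time (odd leftover spans to end of text), instead of A's single interleaved find-start/find-end loop.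
import Mathlib
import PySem

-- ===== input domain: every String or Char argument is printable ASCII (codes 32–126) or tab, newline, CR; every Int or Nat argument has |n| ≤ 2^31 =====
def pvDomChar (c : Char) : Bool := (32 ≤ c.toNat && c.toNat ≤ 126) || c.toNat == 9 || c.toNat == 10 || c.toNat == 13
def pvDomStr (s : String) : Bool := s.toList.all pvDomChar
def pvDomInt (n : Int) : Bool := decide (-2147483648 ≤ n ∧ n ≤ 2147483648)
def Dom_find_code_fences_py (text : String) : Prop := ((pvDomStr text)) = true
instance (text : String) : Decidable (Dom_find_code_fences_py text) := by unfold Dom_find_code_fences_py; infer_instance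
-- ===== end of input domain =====

-- B is an alternative decomposition of A (collect all fence positions first, then pair them),
-- same cost; equality of return values is proved on all inputs (both programs are total).
-- Loops are written with a fuel parameter (always sufficient: each step advances the index) purely to make the recursion structural.

-- Shared model of Python's text.find("```", i) for a non-negative start i:
-- the first index j ≥ i with text[j:j+3] == "```", none when there is none (Python's -1).
-- Exact on every string: it scans index by index exactly as str.find does.
def findFenceGo (cs : List Char) : Nat → Nat → Option Nat
  | 0, _ => none
  | fuel+1, i =>
    if i + 3 ≤ cs.length then
      if cs.getD i ' ' = '`' ∧ cs.getD (i+1) ' ' = '`' ∧ cs.getD (i+2) ' ' = '`' then some i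
      else findFenceGo cs fuel (i+1)
    else none

def findFence (cs : List Char) (i : Nat) : Option Nat :=
  findFenceGo cs (cs.length + 1) i

-- ===== PORT A =====
-- A's while loop: find the next fence start from i, find its close from start+3, emit, continue at end.
def fenceLoopA (cs : List Char) : Nat → Nat → List (Int × Int)
  | 0, _ => []
  | fuel+1, i =>
    if i < cs.length then
      match findFence cs i with
      | none => []
      | some start =>
        match findFence cs (start + 3) with
        | none => [((start : Int), (cs.length : Int))]
        | some e => ((start : Int), ((e : Int) + 3)) :: fenceLoopA cs fuel (e + 3)
    else []

def find_code_fences_py (text : String) : List (Int × Int) :=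
  fenceLoopA text.toList (text.toList.length + 1) 0

-- ===== PORT B =====
-- B pass 1: collect every non-overlapping fence start position.
def fencePositionsGo (cs : List Char) : Nat → Nat → List Nat
  | 0, _ => []
  | fuel+1, p =>
    match findFence cs p with
    | none => []
    | some q => q :: fencePositionsGo cs fuel (q + 3)

def fencePositions (cs : List Char) (p : Nat) : List Nat :=
  fencePositionsGo cs (cs.length + 1) p

-- B pass 2: pair the positions two at a time; an odd leftover spans to the end of the text.
def pairFences (n : Nat) : List Nat → List (Int × Int)
  | p :: q :: rest => ((p : Int), ((q : Int) + 3)) :: pairFences n rest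
  | [p] => [((p : Int), (n : Int))]
  | [] => []

def find_code_fences_py_alt (text : String) : List (Int × Int) :=
  pairFences text.toList.length (fencePositions text.toList 0)

-- ===== PRECONDITION & SPEC =====
def Spec_find_code_fences_py (text : String) (out : List (Int × Int)) : Prop := out = find_code_fences_py_alt text
instance (text : String) (out : List (Int × Int)) : Decidable (Spec_find_code_fences_py text out) := by unfold Spec_find_code_fences_py; infer_instance

-- ===== CLAIM (what is proved, stated in full; the proofs are below) =====
def Claim_equal_find_code_fences_py : Prop := ∀ (text : String), Dom_find_code_fences_py text → Spec_find_code_fences_py text (find_code_fences_py text)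

-- ===== LEMMAS AND PROOFS =====

-- a found fence lies at or after the start index, with room for its 3 characters
theorem findFenceGo_some (cs : List Char) :
    ∀ (fuel i p : Nat), findFenceGo cs fuel i = some p → i ≤ p ∧ p + 3 ≤ cs.length := by
  intro fuel
  induction fuel with
  | zero => intro i p h; simp [findFenceGo] at h
  | succ fuel ih =>
    intro i p h
    simp only [findFenceGo] at h
    split at h
    · split at h
      · cases h; omega
      · have := ih (i+1) p h; omega
    · cases h

theorem findFence_some {cs : List Char} {i p : Nat} (h : findFence cs i = some p) :
    i ≤ p ∧ p + 3 ≤ cs.length :=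
  findFenceGo_some cs (cs.length + 1) i p h

-- past index length-2 there is no room left for a fence
theorem findFence_none_of_ge {cs : List Char} {i : Nat} (h : cs.length ≤ i + 2) :
    findFence cs i = none := by
  unfold findFence
  generalize cs.length + 1 = fuel
  cases fuel with
  | zero => rfl
  | succ fuel => simp only [findFenceGo]; rw [if_neg (by omega)]

-- the fuel of the collection pass is irrelevant once it exceeds the remaining length
theorem fencePositionsGo_irrel (cs : List Char) :
    ∀ (f g p : Nat), cs.length - p < f → cs.length - p < g →
      fencePositionsGo cs f p = fencePositionsGo cs g p := by
  intro f
  induction f with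
  | zero => intro g p hf _; omega
  | succ f ih =>
    intro g p hf hg
    cases g with
    | zero => omega
    | succ g =>
      simp only [fencePositionsGo]
      cases hs : findFence cs p with
      | none => rfl
      | some q =>
        have hq := findFence_some hs
        dsimp only
        rw [ih g (q + 3) (by omega) (by omega)]

theorem fencePositionsGo_succ (cs : List Char) (fuel p : Nat) :
    fencePositionsGo cs (fuel + 1) p =
      match findFence cs p with
      | none => []
      | some q => q :: fencePositionsGo cs fuel (q + 3) := rfl

-- one-step unfolding of B's collection pass
theorem fencePositions_unfold (cs : List Char) (p : Nat) :
    fencePositions cs p =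
      match findFence cs p with
      | none => []
      | some q => q :: fencePositions cs (q + 3) := by
  unfold fencePositions
  rw [fencePositionsGo_succ]
  cases hs : findFence cs p with
  | none => rfl
  | some q =>
    have hq := findFence_some hs
    dsimp only
    rw [fencePositionsGo_irrel cs cs.length (cs.length + 1) (q + 3) (by omega) (by omega)]

-- key invariant: A's loop from any index equals B's pairing of the positions collected from it
theorem loop_eq_pair (cs : List Char) :
    ∀ (f i : Nat), cs.length - i < f →
      fenceLoopA cs f i = pairFences cs.length (fencePositions cs i) := by
  intro f
  induction f with
  | zero => intro i hf; omega
  | succ f ih =>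
    intro i hf
    simp only [fenceLoopA]
    rw [fencePositions_unfold]
    by_cases hi : i < cs.length
    · rw [if_pos hi]
      cases hs : findFence cs i with
      | none => simp [pairFences]
      | some start =>
        have hst := findFence_some hs
        dsimp only
        cases he : findFence cs (start + 3) with
        | none =>
          rw [fencePositions_unfold cs (start + 3), he]
          simp [pairFences]
        | some e =>
          have hev := findFence_some he
          rw [fencePositions_unfold cs (start + 3), he]
          simp only [pairFences]
          rw [ih (e + 3) (by omega)]
    · rw [if_neg hi, findFence_none_of_ge (by omega)]
      simp [pairFences]

-- ===== VERDICT (by name: the statement is the Claim_ definition above) =====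
theorem find_code_fences_py_spec : Claim_equal_find_code_fences_py := by
  intro text _
  unfold Spec_find_code_fences_py find_code_fences_py find_code_fences_py_alt
  exact loop_eq_pair text.toList (text.toList.length + 1) 0 (by omega)
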